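-- pv_equiv track=rewrite | github.com/vidyasagar06K/Encoding_Decoding_tool | Encoding_Decoding tool.py | b8zs_decode
-- ===== SOURCE A (Python) =====
-- def b8zs_decode(encoded_data):
--     decoded_data = []
--     zero_count = 0
--     for level in encoded_data:
--         if level == 0:
--             zero_count += 1
--             if zero_count == 4:
--                 zero_count = 0
--                 continue
--         else:
--             zero_count = 0
--         decoded_data.append(str(level))
--     return decoded_data
-- ===== SOURCE B (Python) =====
-- from itertools import groupby
--
-- def b8zs_decode(encoded_data):
--     decoded_data = []
--     for key, grp in groupby(encoded_data):
--         if key == 0: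
--             decoded_data.extend(str(x) for i, x in enumerate(grp) if i % 4 != 3)
--         else:
--             decoded_data.extend(str(x) for x in grp)
--     return decoded_data
-- ===== Notes on version B (the rewrite author's own statement) =====
-- stated objective: alternative
-- what changed: Replaces A's element-by-element loop with a running zero-counter by an itertools.groupby decomposition into maximal runs of equal values, dropping every 4th element of each zero run by its position in the run.
import Mathlib
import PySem

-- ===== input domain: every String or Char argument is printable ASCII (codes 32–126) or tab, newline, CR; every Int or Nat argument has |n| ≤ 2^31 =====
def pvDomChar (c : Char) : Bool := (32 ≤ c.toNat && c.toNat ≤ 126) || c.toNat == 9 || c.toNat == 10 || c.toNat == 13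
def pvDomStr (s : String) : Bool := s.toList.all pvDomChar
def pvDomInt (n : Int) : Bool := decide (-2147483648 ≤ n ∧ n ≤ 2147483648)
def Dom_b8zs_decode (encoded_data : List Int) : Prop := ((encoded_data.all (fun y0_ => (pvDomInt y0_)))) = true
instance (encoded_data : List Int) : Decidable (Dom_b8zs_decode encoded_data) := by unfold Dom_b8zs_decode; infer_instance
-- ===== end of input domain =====

-- B replaces A's running zero-counter loop by a groupby decomposition: maximal equal runs,
-- dropping every 4th element of each zero run (objective: alternative decomposition, same cost).

-- ===== PORT A =====
-- loop state: (decoded_data, zero_count)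
def b8zs_decode (encoded_data : List Int) : List String :=
  (encoded_data.foldl
    (fun (st : List String × Int) level =>
      if level = 0 then
        if st.2 + 1 = 4 then (st.1, 0)                                -- zero_count = 0; continue
        else (st.1 ++ [PySem.Int.toStr level], st.2 + 1)
      else (st.1 ++ [PySem.Int.toStr level], 0))
    (([] : List String), (0 : Int))).1

-- ===== PORT B =====
-- itertools.groupby: maximal runs of equal elements, as (key, run) pairs
def pyGroupby (l : List Int) : List (Int × List Int) :=
  match l with
  | [] => []
  | x :: xs => (x, x :: xs.takeWhile (· == x)) :: pyGroupby (xs.dropWhile (· == x))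
termination_by l.length
decreasing_by simpa using Nat.lt_succ_of_le (xs.length_dropWhile_le _)

def b8zs_decode_alt (encoded_data : List Int) : List String :=
  (pyGroupby encoded_data).foldl
    (fun acc kg =>
      if kg.1 = 0 then
        acc ++ ((PySem.List.enumerate kg.2 0).filter
                  (fun p => PySem.Int.mod p.1 4 != 3)).map (fun p => PySem.Int.toStr p.2)
      else acc ++ kg.2.map (fun x => PySem.Int.toStr x)) []

-- ===== PRECONDITION & SPEC =====
def Spec_b8zs_decode (encoded_data : List Int) (out : List String) : Prop := out = b8zs_decode_alt encoded_data
instance (encoded_data : List Int) (out : List String) : Decidable (Spec_b8zs_decode encoded_data out) := by unfold Spec_b8zs_decode; infer_instance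

-- ===== CLAIM (what is proved, stated in full; the proofs are below) =====
def Claim_equal_b8zs_decode : Prop := ∀ (encoded_data : List Int), Dom_b8zs_decode encoded_data → Spec_b8zs_decode encoded_data (b8zs_decode encoded_data)

-- ===== LEMMAS AND PROOFS =====

-- A's loop as a front-building recursion
def aGo : List Int → Int → List String
  | [], _ => []
  | x :: xs, zc =>
    if x = 0 then
      if zc + 1 = 4 then aGo xs 0
      else PySem.Int.toStr x :: aGo xs (zc + 1)
    else PySem.Int.toStr x :: aGo xs 0

-- the run payload emitted by B for a run (k, g)
def bRun (kg : Int × List Int) : List String :=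
  if kg.1 = 0 then
    ((PySem.List.enumerate kg.2 0).filter
      (fun p => PySem.Int.mod p.1 4 != 3)).map (fun p => PySem.Int.toStr p.2)
  else kg.2.map (fun x => PySem.Int.toStr x)

lemma aFoldl (l : List Int) (acc : List String) (zc : Int) :
    (l.foldl
      (fun (st : List String × Int) level =>
        if level = 0 then
          if st.2 + 1 = 4 then (st.1, 0)
          else (st.1 ++ [PySem.Int.toStr level], st.2 + 1)
        else (st.1 ++ [PySem.Int.toStr level], 0)) (acc, zc)).1
    = acc ++ aGo l zc := by
  induction l generalizing acc zc with
  | nil => simp [aGo]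
  | cons x xs ih =>
    simp only [List.foldl_cons, aGo]
    split_ifs <;> simp [ih]

lemma altFlat (l : List Int) :
    b8zs_decode_alt l = (pyGroupby l).flatMap bRun := by
  have hf : (fun (acc : List String) (kg : Int × List Int) =>
      if kg.1 = 0 then
        acc ++ ((PySem.List.enumerate kg.2 0).filter
                  (fun p => PySem.Int.mod p.1 4 != 3)).map (fun p => PySem.Int.toStr p.2)
      else acc ++ kg.2.map (fun x => PySem.Int.toStr x))
      = fun acc kg => acc ++ bRun kg := by
    funext acc kg
    unfold bRun
    split <;> rfl
  rw [b8zs_decode_alt, hf]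
  exact (List.flatMap_eq_foldl ..).symm

lemma headNZ (rest : List Int) (zc : Int)
    (h : rest = [] ∨ ∃ y ys, rest = y :: ys ∧ y ≠ 0) :
    aGo rest zc = aGo rest 0 := by
  rcases h with rfl | ⟨y, ys, rfl, hy⟩
  · simp [aGo]
  · simp [aGo, hy]

lemma nonzeroRun (g rest : List Int) (h : ∀ x ∈ g, x ≠ (0 : Int)) :
    aGo (g ++ rest) 0 = g.map PySem.Int.toStr ++ aGo rest 0 := by
  induction g with
  | nil => simp
  | cons x xs ih =>
    have hx : x ≠ 0 := h x (by simp)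
    simp [aGo, hx, ih (fun a ha => h a (by simp [ha]))]

lemma zeroRun (g rest : List Int) (j : Int) (hj : 0 ≤ j) (h : ∀ x ∈ g, x = (0 : Int)) :
    aGo (g ++ rest) (j % 4)
    = ((PySem.List.enumerate g j).filter
        (fun p => PySem.Int.mod p.1 4 != 3)).map (fun p => PySem.Int.toStr p.2)
      ++ aGo rest ((j + g.length) % 4) := by
  induction g generalizing j with
  | nil => simp [PySem.List.enumerate]
  | cons x xs ih =>
    have hx : x = 0 := h x (by simp)
    have hxs : ∀ a ∈ xs, a = (0 : Int) := fun a ha => h a (by simp [ha])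
    subst hx
    rw [List.cons_append, PySem.List.enumerate_cons, List.filter_cons]
    have ihj := ih (j + 1) (by omega) hxs
    by_cases h3 : j % 4 = 3
    · have hc : j % 4 + 1 = 4 := by omega
      have hL : aGo (0 :: (xs ++ rest)) (j % 4) = aGo (xs ++ rest) 0 := by
        simp [aGo, hc]
      have hb : (PySem.Int.mod (j, (0:Int)).1 4 != 3) = false := by
        simp [h3]
      have h0 : (j + 1) % 4 = 0 := by omega
      rw [h0] at ihj
      rw [hL, hb, if_neg (by simp), ihj]
      congr 2
      simp only [List.length_cons]
      push_cast
      omega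
    · have hc : ¬ (j % 4 + 1 = 4) := by omega
      have hL : aGo (0 :: (xs ++ rest)) (j % 4)
          = PySem.Int.toStr 0 :: aGo (xs ++ rest) (j % 4 + 1) := by
        simp [aGo, hc]
      have hb : (PySem.Int.mod (j, (0:Int)).1 4 != 3) = true := by
        simp [h3]
      have h0 : j % 4 + 1 = (j + 1) % 4 := by omega
      rw [hL, hb, if_pos rfl, h0, ihj]
      simp only [List.map_cons, List.length_cons, List.cons_append]
      congr 3
      push_cast
      omega

lemma dropWhile_head_not (p : Int → Bool) (xs ys : List Int) (y : Int)
    (h : xs.dropWhile p = y :: ys) : p y = false := by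
  have h0 : 0 < (xs.dropWhile p).length := by simp [h]
  have h1 := List.dropWhile_get_zero_not p xs h0
  rw [List.get_eq_getElem, List.getElem_of_eq h] at h1
  simpa using h1

lemma main_eq (l : List Int) : aGo l 0 = (pyGroupby l).flatMap bRun := by
  induction l using pyGroupby.induct with
  | case1 => simp [pyGroupby, aGo]
  | case2 x xs ih =>
    rw [pyGroupby, List.flatMap_cons, ← ih]
    have hsplit : x :: xs = (x :: xs.takeWhile (· == x)) ++ xs.dropWhile (· == x) := by
      simp [List.takeWhile_append_dropWhile]
    by_cases hx : x = 0
    · subst hx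
      have hz : ∀ a ∈ (0 : Int) :: xs.takeWhile (· == (0:Int)), a = (0 : Int) := by
        intro a ha
        rcases List.mem_cons.mp ha with rfl | ha
        · rfl
        · simpa using List.mem_takeWhile_imp ha
      have hrest : ∀ zc, aGo (xs.dropWhile (· == (0:Int))) zc
          = aGo (xs.dropWhile (· == (0:Int))) 0 := by
        intro zc
        apply headNZ
        cases hd : xs.dropWhile (· == (0:Int)) with
        | nil => exact Or.inl rfl
        | cons y ys =>
          refine Or.inr ⟨y, ys, rfl, ?_⟩
          have := dropWhile_head_not _ _ _ _ hd
          simpa using this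
      have hzr := zeroRun ((0:Int) :: xs.takeWhile (· == (0:Int)))
        (xs.dropWhile (· == (0:Int))) 0 (le_refl 0) hz
      conv_lhs => rw [hsplit]
      rw [show ((0:Int) % 4) = 0 from rfl] at hzr
      rw [hzr, hrest, bRun]
      simp
    · have hnz : ∀ a ∈ x :: xs.takeWhile (· == x), a ≠ (0 : Int) := by
        intro a ha
        rcases List.mem_cons.mp ha with rfl | ha
        · exact hx
        · have : a = x := by simpa using List.mem_takeWhile_imp ha
          rw [this]; exact hx
      conv_lhs => rw [hsplit]
      rw [nonzeroRun _ _ hnz, bRun]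
      simp [hx]

-- ===== VERDICT (by name: the statement is the Claim_ definition above) =====
theorem b8zs_decode_spec : Claim_equal_b8zs_decode := by
  intro l _
  show b8zs_decode l = b8zs_decode_alt l
  rw [b8zs_decode, aFoldl, altFlat, main_eq]
  simp
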